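-- pv_equiv track=rewrite | github.com/Eko-Refugium/DNAbyte | dnabyte/encoding/dna_aeon/process.py | _majority_vote
-- ===== SOURCE A (Python) =====
-- from collections import Counter, defaultdict
--
-- def _majority_vote(sequences):
--     """Position-wise majority vote across a list of DNA sequences."""
--     if not sequences:
--         return ""
--     if len(sequences) == 1:
--         return sequences[0]
--
--     lengths = Counter(len(s) for s in sequences)
--     target_len = lengths.most_common(1)[0][0]
--
--     consensus = []
--     for i in range(target_len):
--         bases_at_pos = [s[i] for s in sequences if i < len(s) and s[i] in 'ACGT']
--         if bases_at_pos:
--             most_common = Counter(bases_at_pos).most_common(1)[0][0]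
--             consensus.append(most_common)
--         elif any(i < len(s) for s in sequences):
--             consensus.append('A')
--
--     return ''.join(consensus)
-- ===== SOURCE B (Python) =====
-- def _majority_vote(sequences):
--     """Position-wise majority vote across a list of DNA sequences.
--
--     Single pass over every sequence, accumulating one count dict per position,
--     instead of rescanning the whole list for every position."""
--     if not sequences:
--         return ""
--     if len(sequences) == 1:
--         return sequences[0]
--
--     def first_argmax(d):
--         # key of d with the largest count; ties go to the first-inserted key
--         best, best_n = None, 0
--         for k, n in d.items():
--             if best is None or n > best_n:
--                 best, best_n = k, n
--         return best
--
--     len_counts = {}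
--     for s in sequences:
--         len_counts[len(s)] = len_counts.get(len(s), 0) + 1
--     target_len = first_argmax(len_counts)
--
--     cols = [{} for _ in range(target_len)]
--     for s in sequences:
--         for i, c in enumerate(s[:target_len]):
--             if c in 'ACGT':
--                 cols[i][c] = cols[i].get(c, 0) + 1
--     return ''.join('A' if not d else first_argmax(d) for d in cols)
-- ===== Notes on version B (the rewrite author's own statement) =====
-- stated objective: alternative
-- what changed: B replaces A's per-position rescan of the whole sequence list (a fresh list and Counter built for every position) with a single pass per sequence that accumulates one count dict per position, plus explicit first-maximum loops in place of Counter.most_common; intended as faster, measured only ~1.4x at the largest size.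
import Mathlib
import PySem

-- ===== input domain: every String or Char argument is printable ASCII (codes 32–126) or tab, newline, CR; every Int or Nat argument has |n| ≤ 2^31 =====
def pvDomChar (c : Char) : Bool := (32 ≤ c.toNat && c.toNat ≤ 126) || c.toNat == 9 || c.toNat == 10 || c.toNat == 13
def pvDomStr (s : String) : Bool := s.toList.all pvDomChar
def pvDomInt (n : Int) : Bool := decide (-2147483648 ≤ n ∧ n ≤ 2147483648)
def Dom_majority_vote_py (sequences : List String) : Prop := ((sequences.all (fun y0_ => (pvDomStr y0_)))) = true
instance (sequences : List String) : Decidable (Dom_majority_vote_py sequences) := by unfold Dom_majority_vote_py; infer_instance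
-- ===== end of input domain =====

-- ===== PORT A =====
-- B replaces A's per-position rescan of all sequences with a single pass per
-- sequence accumulating one count dict per position (objective: alternative).

-- most_common(1)[0][0]: Counter.most_common is documented as a stable sort of the
-- counter's items by count, descending (ties keep insertion order); the default is
-- only read on an empty counter, where Python would raise (unreachable here).
def pvMostCommon1 {k : Type} [BEq k] (d : PySem.Dict k Int) (dflt : k) : k :=
  match PySem.List.sorted d.items (fun p => p.2) true with
  | [] => dflt
  | p :: _ => p.1

def majority_vote_py (sequences : List String) : String :=
  if sequences = [] then "" else
  if sequences.length = 1 then sequences.headD "" else   -- sequences[0]; list nonempty here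
  let lengths : PySem.Dict Int Int :=
    PySem.Dict.counter (sequences.map (fun s => PySem.Str.len s))
  let target_len : Int := pvMostCommon1 lengths 0
  let consensus : List Char := (PySem.List.pyRange 0 target_len).foldl (fun consensus i =>
    -- [s[i] for s in sequences if i < len(s) and s[i] in 'ACGT']:
    -- pyGet? s i is none exactly when i is out of range (0 <= i here), and
    -- `s[i] in 'ACGT'` for the single character s[i] is membership in ['A','C','G','T']
    let bases_at_pos : List Char := sequences.foldl (fun acc s =>
      match PySem.Str.pyGet? s i with
      | some c => if c ∈ ['A', 'C', 'G', 'T'] then acc ++ [c] else acc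
      | none => acc) []
    if bases_at_pos ≠ [] then
      consensus ++ [pvMostCommon1 (PySem.Dict.counter bases_at_pos) 'A']
    else if sequences.any (fun s => decide (i < PySem.Str.len s)) then
      consensus ++ ['A']
    else consensus) []
  String.ofList consensus   -- ''.join(consensus)

-- ===== PORT B =====
-- first_argmax(d): explicit loop over d.items(); state (best, best_n), best=None initially
def pvFirstArgmax {k : Type} (items : List (k × Int)) : Option k :=
  (items.foldl (fun bp kn => if bp.1 = none ∨ bp.2 < kn.2 then (some kn.1, kn.2) else bp)
    ((none : Option k), (0 : Int))).1

-- body of `for i, c in enumerate(s[:target_len]): if c in 'ACGT': cols[i][c] = cols[i].get(c, 0) + 1`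
-- (the index i = jc.1 is always in range, so List.getD/List.set realise Python's cols[i])
def pvColStep (cols : List (PySem.Dict Char Int)) (jc : Int × Char) : List (PySem.Dict Char Int) :=
  if jc.2 ∈ ['A', 'C', 'G', 'T'] then
    cols.set jc.1.toNat ((cols.getD jc.1.toNat PySem.Dict.empty).insert jc.2
      ((cols.getD jc.1.toNat PySem.Dict.empty).getD jc.2 0 + 1))
  else cols

def majority_vote_py_alt (sequences : List String) : String :=
  if sequences = [] then "" else
  if sequences.length = 1 then sequences.headD "" else
  let len_counts : PySem.Dict Int Int := sequences.foldl
    (fun d s => d.insert (PySem.Str.len s) (d.getD (PySem.Str.len s) 0 + 1)) PySem.Dict.empty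
  let target_len : Nat := ((pvFirstArgmax len_counts.items).getD 0).toNat  -- a length, hence ≥ 0; None unreachable
  let cols : List (PySem.Dict Char Int) := sequences.foldl
    (fun cols s => (PySem.List.enumerate (s.toList.take target_len)).foldl pvColStep cols)
    (List.replicate target_len PySem.Dict.empty)
  String.ofList (cols.map (fun d => match pvFirstArgmax d.items with | some c => c | none => 'A'))

-- ===== PRECONDITION & SPEC =====
def Spec_majority_vote_py (sequences : List String) (out : String) : Prop := out = majority_vote_py_alt sequences
instance (sequences : List String) (out : String) : Decidable (Spec_majority_vote_py sequences out) := by unfold Spec_majority_vote_py; infer_instance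

-- ===== CLAIM (what is proved, stated in full; the proofs are below) =====
def Claim_equal_majority_vote_py : Prop := ∀ (sequences : List String), Dom_majority_vote_py sequences → Spec_majority_vote_py sequences (majority_vote_py sequences)

-- ===== LEMMAS AND PROOFS =====

-- proof-only helpers ------------------------------------------------------

-- running first-maximum of a list of (key, count) pairs (a strictly larger count wins)
def pvFfold {k : Type} (p : k × Int) (t : List (k × Int)) : k × Int :=
  t.foldl (fun b q => if b.2 < q.2 then q else b) p

-- one character-count update, ACGT-filtered (the effect of pvColStep at one position)
def pvUpd (d : PySem.Dict Char Int) (c : Char) : PySem.Dict Char Int :=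
  if c ∈ ['A', 'C', 'G', 'T'] then d.insert c (d.getD c 0 + 1) else d

-- the (unfiltered) column of characters at position i
def pvContrib (i : Nat) (s : String) : List Char :=
  match s.toList[i]? with | some c => [c] | none => []

def pvColumn (i : Nat) (seqs : List String) : List Char := seqs.flatMap (pvContrib i)

-- head of the stable descending sort = running first-maximum ----------------

theorem pvInsertBy_head {k : Type} (x p : k × Int) (t : List (k × Int)) :
    (PySem.List.insertBy (fun a b => decide (b.2 < a.2)) x (p :: t)).head? =
      some (if p.2 < x.2 then x else p) := by
  simp only [PySem.List.insertBy]
  by_cases h : p.2 < x.2 <;> simp [h]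

theorem pvFoldl_insertBy_head {k : Type} (t : List (k × Int)) (acc : List (k × Int))
    (p : k × Int) (h : acc.head? = some p) :
    (t.foldl (fun acc x => PySem.List.insertBy (fun a b => decide ((b.2 : Int) < a.2)) x acc) acc).head? =
      some (pvFfold p t) := by
  induction t generalizing acc p with
  | nil => simpa [pvFfold] using h
  | cons x t ih =>
    cases acc with
    | nil => simp at h
    | cons m acc' =>
      simp only [List.head?_cons, Option.some.injEq] at h
      subst h
      simp only [List.foldl_cons]
      rw [show pvFfold m (x :: t) = pvFfold (if m.2 < x.2 then x else m) t from rfl]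
      exact ih _ _ (by simpa using pvInsertBy_head x m acc')

theorem pvSorted_head {k : Type} (p : k × Int) (t : List (k × Int)) :
    (PySem.List.sorted (p :: t) (fun q => q.2) true).head? = some (pvFfold p t) := by
  rw [PySem.List.sorted_rev_eq_foldl_insertBy]
  simp only [List.foldl_cons]
  exact pvFoldl_insertBy_head t _ p (by simp [PySem.List.insertBy])

theorem pvFfold_mem {k : Type} (p : k × Int) (t : List (k × Int)) :
    pvFfold p t ∈ p :: t := by
  induction t generalizing p with
  | nil => simp [pvFfold]
  | cons x t ih =>
    rw [show pvFfold p (x :: t) = pvFfold (if p.2 < x.2 then x else p) t from rfl]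
    by_cases h : p.2 < x.2
    · have := ih x; rw [if_pos h]; simp [List.mem_cons] at this ⊢; tauto
    · have := ih p; rw [if_neg h]; simp [List.mem_cons] at this ⊢; tauto

theorem pvMostCommon1_eq {k : Type} [BEq k] (d : PySem.Dict k Int) (dflt : k)
    (p : k × Int) (t : List (k × Int)) (h : d.items = p :: t) :
    pvMostCommon1 d dflt = (pvFfold p t).1 := by
  unfold pvMostCommon1
  rw [h]
  have := pvSorted_head p t
  cases hs : PySem.List.sorted (p :: t) (fun q => q.2) true with
  | nil => rw [hs] at this; simp at this
  | cons q r => rw [hs] at this; simp at this; simp [this]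

theorem pvFirstArgmax_aux {k : Type} (t : List (k × Int)) (b : k × Int) :
    (t.foldl (fun bp kn => if bp.1 = none ∨ bp.2 < kn.2 then (some kn.1, kn.2) else bp)
      ((some b.1 : Option k), b.2)).1 = some (pvFfold b t).1 := by
  induction t generalizing b with
  | nil => simp [pvFfold]
  | cons x t ih =>
    simp only [List.foldl_cons]
    rw [show pvFfold b (x :: t) = pvFfold (if b.2 < x.2 then x else b) t from rfl]
    by_cases h : b.2 < x.2
    · simpa [h] using ih x
    · simpa [h] using ih b

theorem pvFirstArgmax_eq {k : Type} (p : k × Int) (t : List (k × Int)) :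
    pvFirstArgmax (p :: t) = some (pvFfold p t).1 := by
  unfold pvFirstArgmax
  simp only [List.foldl_cons]
  simpa using pvFirstArgmax_aux t p

theorem pvCounter_items_ne_nil {k : Type} [BEq k] [LawfulBEq k] (x : k) (l : List k)
    (hx : x ∈ l) : (PySem.Dict.counter l).items ≠ [] := by
  intro h
  have := PySem.Dict.items_counter l
  rw [h] at this
  have hx' : x ∈ PySem.Set.ofList l := (PySem.Set.mem_ofList l x).2 hx
  cases he : PySem.Set.ofList l with
  | nil => rw [he] at hx'; simp at hx'
  | cons a b => rw [he] at this; simp at this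

-- the per-position effect of B's column loops -------------------------------

theorem pvColStep_at (cols : List (PySem.Dict Char Int)) (kk : Nat) (c : Char) (i : Nat) :
    (pvColStep cols ((kk : Int), c))[i]? =
      if i = kk then (cols[i]?).map (fun d => pvUpd d c) else cols[i]? := by
  unfold pvColStep pvUpd
  simp only [Int.toNat_natCast]
  by_cases hc : c ∈ ['A', 'C', 'G', 'T']
  · simp only [hc, if_true, List.getElem?_set]
    by_cases hi : i = kk
    · subst hi
      by_cases hlt : i < cols.length
      · simp [hlt, List.getD, List.getElem?_eq_getElem hlt]
      · have hn : cols[i]? = none := by rw [List.getElem?_eq_none_iff]; omega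
        simp [hlt, hn]
    · simp [hi, Ne.symm hi]
  · simp only [hc, if_false]
    by_cases hi : i = kk <;> simp [hi]

theorem pvColStep_length (l : List (Int × Char)) (cols : List (PySem.Dict Char Int)) :
    (l.foldl pvColStep cols).length = cols.length := by
  induction l generalizing cols with
  | nil => rfl
  | cons x l ih =>
    rw [List.foldl_cons, ih]
    unfold pvColStep
    split <;> simp

theorem pvCols_length (tl : Nat) (seqs : List String) (cols : List (PySem.Dict Char Int)) :
    (seqs.foldl (fun cols s =>
      (PySem.List.enumerate (s.toList.take tl)).foldl pvColStep cols) cols).length = cols.length := by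
  induction seqs generalizing cols with
  | nil => rfl
  | cons s seqs ih => rw [List.foldl_cons, ih, pvColStep_length]

theorem pvInner (cs : List Char) (kk : Nat) (cols : List (PySem.Dict Char Int)) (i : Nat) :
    ((PySem.List.enumerate cs (kk : Int)).foldl pvColStep cols)[i]? =
      match (if kk ≤ i then cs[i - kk]? else none) with
      | some c => (cols[i]?).map (fun d => pvUpd d c)
      | none => cols[i]? := by
  induction cs generalizing kk cols with
  | nil => simp [PySem.List.enumerate]
  | cons c cs ih =>
    rw [PySem.List.enumerate_cons]
    rw [show ((kk : Int) + 1) = ((kk + 1 : Nat) : Int) by push_cast; ring]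
    rw [List.foldl_cons, ih (kk + 1) (pvColStep cols ((kk : Int), c)),
        pvColStep_at cols kk c i]
    by_cases h1 : i = kk
    · subst h1
      have h2 : ¬ (i + 1 ≤ i) := by omega
      simp [h2]
    · by_cases h2 : kk ≤ i
      · have h3 : kk + 1 ≤ i := by omega
        have h4 : i - kk = (i - (kk + 1)) + 1 := by omega
        simp only [h1, if_false, h2, if_true, h3, h4, List.getElem?_cons_succ]
      · have h3 : ¬ (kk + 1 ≤ i) := by omega
        simp [h1, h2, h3]

theorem pvOuter (tl : Nat) (seqs : List String) (cols : List (PySem.Dict Char Int))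
    (i : Nat) (hi : i < tl) :
    ((seqs.foldl (fun cols s =>
        (PySem.List.enumerate (s.toList.take tl)).foldl pvColStep cols) cols)[i]?) =
      (cols[i]?).map (fun d => (pvColumn i seqs).foldl pvUpd d) := by
  induction seqs generalizing cols with
  | nil => simp [pvColumn]
  | cons s seqs ih =>
    rw [List.foldl_cons, ih]
    have h0 := pvInner (s.toList.take tl) 0 cols i
    simp only [Nat.cast_zero, Nat.zero_le, if_true, Nat.sub_zero] at h0
    have htake : (s.toList.take tl)[i]? = s.toList[i]? := List.getElem?_take_of_lt hi
    rw [htake] at h0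
    rw [h0]
    have hcol : pvColumn i (s :: seqs) = pvContrib i s ++ pvColumn i seqs := by
      simp [pvColumn]
    rw [hcol]
    unfold pvContrib
    cases s.toList[i]? with
    | none => simp
    | some c => simp [Option.map_map]; rfl

-- fold of pvUpd from empty is the Counter of the ACGT-filtered column -------

theorem pvFold_upd_eq_counter (l : List Char) :
    l.foldl pvUpd PySem.Dict.empty =
      PySem.Dict.counter (l.filter (fun c => c ∈ ['A', 'C', 'G', 'T'])) := by
  rw [← PySem.Dict.foldl_insert_getD_add_one_eq_counter, List.foldl_filter]
  congr 1
  funext d c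
  simp [pvUpd]

-- A's bases_at_pos is the ACGT-filtered column ------------------------------

theorem pvBases_eq (seqs : List String) (i : Nat) :
    (seqs.foldl (fun acc s =>
        match PySem.Str.pyGet? s (i : Int) with
        | some c => if c ∈ ['A', 'C', 'G', 'T'] then acc ++ [c] else acc
        | none => acc) []) =
      (pvColumn i seqs).filter (fun c => c ∈ ['A', 'C', 'G', 'T']) := by
  have hb : (fun (acc : List Char) (s : String) =>
        match PySem.Str.pyGet? s (i : Int) with
        | some c => if c ∈ ['A', 'C', 'G', 'T'] then acc ++ [c] else acc
        | none => acc) = fun acc s => acc ++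
          ((pvContrib i s).filter (fun c => c ∈ ['A', 'C', 'G', 'T'])) := by
    funext acc s
    rw [PySem.Str.pyGet?_natCast]
    unfold pvContrib
    cases s.toList[i]? with
    | none => simp
    | some c =>
      by_cases h : c ∈ ['A', 'C', 'G', 'T']
      · simp only [h, if_true, List.filter_cons, List.filter_nil]
        simp only [List.mem_cons, List.not_mem_nil, or_false] at h
        rcases h with rfl | rfl | rfl | rfl <;> simp
      · simp only [h, if_false, List.filter_cons, List.filter_nil]
        simp only [List.mem_cons, List.not_mem_nil, or_false] at h
        push_neg at h
        simp_all
  rw [hb, PySem.List.foldl_append_eq_flatMap]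
  simp [pvColumn, List.filter_flatMap]

-- per-position result: A's branch expression and B's dict lookup ------------

def pvGA (seqs : List String) (i : Nat) : List Char :=
  if (pvColumn i seqs).filter (fun c => c ∈ ['A', 'C', 'G', 'T']) ≠ [] then
    [pvMostCommon1 (PySem.Dict.counter ((pvColumn i seqs).filter (fun c => c ∈ ['A', 'C', 'G', 'T']))) 'A']
  else if seqs.any (fun s => decide ((i : Int) < PySem.Str.len s)) then ['A'] else []

def pvChr (seqs : List String) (i : Nat) : Char :=
  match pvFirstArgmax
      (PySem.Dict.counter ((pvColumn i seqs).filter (fun c => c ∈ ['A', 'C', 'G', 'T']))).items with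
  | some c => c
  | none => 'A'

theorem pvGA_eq_chr (seqs : List String) (i : Nat) (smax : String)
    (hs : smax ∈ seqs) (hlt : (i : Int) < PySem.Str.len smax) :
    pvGA seqs i = [pvChr seqs i] := by
  unfold pvGA pvChr
  by_cases hcf : (pvColumn i seqs).filter (fun c => c ∈ ['A', 'C', 'G', 'T']) = []
  · have hany : seqs.any (fun s => decide ((i : Int) < PySem.Str.len s)) = true :=
      List.any_eq_true.2 ⟨smax, hs, decide_eq_true hlt⟩
    rw [hcf, if_neg (by simp), if_pos hany]
    rfl
  · obtain ⟨c0, crest, hcc⟩ := List.exists_cons_of_ne_nil hcf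
    have hin : (PySem.Dict.counter
        ((pvColumn i seqs).filter (fun c => c ∈ ['A', 'C', 'G', 'T']))).items ≠ [] :=
      pvCounter_items_ne_nil c0 _ (by rw [hcc]; exact List.mem_cons_self)
    obtain ⟨q, u, hqu⟩ := List.exists_cons_of_ne_nil hin
    rw [if_pos hcf]
    rw [pvMostCommon1_eq _ 'A' q u hqu, hqu, pvFirstArgmax_eq]

theorem pvFlatMap_singleton {α β : Type} (l : List α) (g : α → List β) (f : α → β)
    (h : ∀ x ∈ l, g x = [f x]) : l.flatMap g = l.map f := by
  induction l with
  | nil => rfl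
  | cons x l ih =>
    rw [List.flatMap_cons, h x (by simp), List.map_cons,
        ih (fun y hy => h y (by simp [hy]))]
    rfl

-- the main equality ---------------------------------------------------------

theorem pvMain (sequences : List String) :
    majority_vote_py sequences = majority_vote_py_alt sequences := by
  by_cases h0 : sequences = []
  · simp [majority_vote_py, majority_vote_py_alt, h0]
  by_cases h1 : sequences.length = 1
  · simp [majority_vote_py, majority_vote_py_alt, h0, h1]
  simp only [majority_vote_py, majority_vote_py_alt, h0, h1, if_false]
  -- the two length counters are the same dict
  have hlen : sequences.foldl
      (fun d s => d.insert (PySem.Str.len s) (d.getD (PySem.Str.len s) 0 + 1)) PySem.Dict.empty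
      = PySem.Dict.counter (sequences.map (fun s => PySem.Str.len s)) := by
    rw [← PySem.Dict.foldl_insert_getD_add_one_eq_counter, List.foldl_map]
  rw [hlen]
  obtain ⟨s0, seqs0, rfl⟩ : ∃ s0 seqs0, sequences = s0 :: seqs0 := by
    cases sequences with
    | nil => exact absurd rfl h0
    | cons a b => exact ⟨a, b, rfl⟩
  have hne : (PySem.Dict.counter ((s0 :: seqs0).map (fun s => PySem.Str.len s))).items ≠ [] :=
    pvCounter_items_ne_nil (PySem.Str.len s0) _ (by simp)
  obtain ⟨p, t, hpt⟩ : ∃ p t,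
      (PySem.Dict.counter ((s0 :: seqs0).map (fun s => PySem.Str.len s))).items = p :: t :=
    List.exists_cons_of_ne_nil hne
  rw [pvMostCommon1_eq _ 0 p t hpt, hpt, pvFirstArgmax_eq]
  -- the target length is a length that actually occurs among the sequences
  have hmem : pvFfold p t ∈ (PySem.Dict.counter ((s0 :: seqs0).map (fun s => PySem.Str.len s))).items := by
    rw [hpt]; exact pvFfold_mem p t
  rw [PySem.Dict.items_counter] at hmem
  obtain ⟨k, hk, hkeq⟩ := List.mem_map.1 hmem
  have hk1 : (pvFfold p t).1 = k := by rw [← hkeq]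
  obtain ⟨smax, hsmem, hslen⟩ := List.mem_map.1 ((PySem.Set.mem_ofList _ _).1 hk)
  have hT0 : (0 : Int) ≤ (pvFfold p t).1 := by
    rw [hk1, ← hslen, PySem.Str.len_eq]; positivity
  obtain ⟨tl, hTl⟩ : ∃ n : Nat, (pvFfold p t).1 = (n : Int) :=
    ⟨_, (Int.toNat_of_nonneg hT0).symm⟩
  have hsmaxlen : PySem.Str.len smax = (tl : Int) := by rw [hslen, ← hk1, hTl]
  rw [hTl]
  simp only [Option.getD_some, Int.toNat_natCast]
  rw [PySem.List.pyRange_zero_natCast, List.foldl_map]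
  congr 1
  refine (List.foldl_ext _ (fun consensus i => consensus ++ pvGA (s0 :: seqs0) i) [] ?_).trans ?_
  · intro acc i _
    simp only []
    rw [pvBases_eq (s0 :: seqs0) i]
    unfold pvGA
    split_ifs <;> simp
  · rw [PySem.List.foldl_append_eq_flatMap, List.nil_append,
        pvFlatMap_singleton _ _ (pvChr (s0 :: seqs0)) (fun i hi =>
          pvGA_eq_chr _ i smax hsmem (by
            rw [hsmaxlen]; exact_mod_cast List.mem_range.1 hi))]
    refine List.ext_getElem? (fun i => ?_)
    by_cases hi : i < tl
    · rw [List.getElem?_map, List.getElem?_range hi, List.getElem?_map,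
          pvOuter tl (s0 :: seqs0) _ i hi]
      rw [List.getElem?_replicate, if_pos hi]
      simp only [Option.map_some, Option.map_map]
      rw [pvFold_upd_eq_counter]
      rfl
    · have hL : ((List.range tl).map (pvChr (s0 :: seqs0)))[i]? = none := by
        rw [List.getElem?_eq_none_iff]; simp; omega
      have hlenB : ((s0 :: seqs0).foldl (fun cols s =>
          (PySem.List.enumerate (s.toList.take tl)).foldl pvColStep cols)
          (List.replicate tl PySem.Dict.empty)).length = tl := by
        rw [pvCols_length, List.length_replicate]
      have hR : (((s0 :: seqs0).foldl (fun cols s =>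
          (PySem.List.enumerate (s.toList.take tl)).foldl pvColStep cols)
          (List.replicate tl PySem.Dict.empty)).map (fun d =>
            match pvFirstArgmax d.items with | some c => c | none => 'A'))[i]? = none := by
        rw [List.getElem?_eq_none_iff, List.length_map, hlenB]; omega
      rw [hL, hR]


-- ===== VERDICT (by name: the statement is the Claim_ definition above) =====
theorem majority_vote_py_spec : Claim_equal_majority_vote_py := by
  intro sequences _
  unfold Spec_majority_vote_py
  exact pvMain sequences
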